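-- pv_equiv track=rewrite | github.com/a1982467767/robocup_2D_kick_analyse | lib/get_data.py | get50cyclebygoal
-- ===== SOURCE A (Python) =====
-- def get50cyclebygoal(goal_cycle,ball_data):
-- 	_50cycle=list()
-- 	all_50cycle=list()
-- 	len_goal_cycle = len(goal_cycle)
-- 	len_ball_data = len(ball_data)
-- 	for i in range(len_goal_cycle):
-- 		count = 0
-- 		for elt in range(len_ball_data):
-- 			if ball_data[elt][0] > goal_cycle[i] - 50 and ball_data[elt][0] <= goal_cycle[i]:
-- 				if count < 50:
-- 					_50cycle.append(ball_data[elt])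
-- 					count+=1
-- 				else:
-- 					continue
-- 			elif ball_data[elt][0] <= goal_cycle[i] - 50:
-- 				continue
-- 			else:
-- 				break
-- 		all_50cycle.append(_50cycle)
-- 		_50cycle = []
-- 	return all_50cycle
-- ===== SOURCE B (Python) =====
-- def get50cyclebygoal(goal_cycle, ball_data):
--     # One preprocessing pass: row i is collected for goal g exactly when
--     # every earlier value is <= g and g-50 < v_i <= g, i.e. when g lies in
--     # the half-open interval [max(running_max, v_i), v_i + 50). Per goal it
--     # remains to filter by interval membership and take the first 50.
--     iv = []
--     m = None
--     for r in ball_data: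
--         v = r[0]
--         lo = v if m is None else max(m, v)
--         iv.append((lo, v + 50, r))
--         m = lo
--     return [[r for (lo, hi, r) in iv if lo <= g < hi][:50] for g in goal_cycle]
-- ===== Notes on version B (the rewrite author's own statement) =====
-- stated objective: alternative
-- what changed: A's per-goal scan with a running count and break is replaced by a one-pass preprocessing that assigns each row its half-open goal interval [max(running_max, v), v+50) via a running maximum; each goal's answer is then just the first 50 rows whose interval contains it.
-- outside the precondition, e.g. on get50cyclebygoal([10], [[100], []]): A returns [[]], B raises IndexError
import Mathlib
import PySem

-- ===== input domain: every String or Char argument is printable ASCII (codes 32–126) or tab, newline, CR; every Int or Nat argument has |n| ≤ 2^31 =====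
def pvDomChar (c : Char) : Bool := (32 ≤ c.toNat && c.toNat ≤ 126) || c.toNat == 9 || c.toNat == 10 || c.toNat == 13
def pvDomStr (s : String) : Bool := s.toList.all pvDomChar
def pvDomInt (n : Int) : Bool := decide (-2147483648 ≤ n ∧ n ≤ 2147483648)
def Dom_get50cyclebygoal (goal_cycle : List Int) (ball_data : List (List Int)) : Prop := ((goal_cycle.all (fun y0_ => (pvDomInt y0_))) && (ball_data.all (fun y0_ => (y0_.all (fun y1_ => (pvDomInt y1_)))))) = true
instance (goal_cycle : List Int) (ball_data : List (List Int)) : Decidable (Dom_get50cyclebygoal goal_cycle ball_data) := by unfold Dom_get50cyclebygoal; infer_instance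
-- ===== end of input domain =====

-- B replaces A's per-goal break/count scan by a one-pass running-max that assigns each row
-- a goal interval [max(prefix_max,v), v+50); per goal B filters by interval membership (same cost, different algorithm).

-- ===== PORT A =====
-- inner loop of A over ball_data for one goal g, with the running count
def pvGoA (g : Int) : List (List Int) → Int → List (List Int)
  | [], _ => []
  | r :: rest, count =>
    let k := PySem.List.pyGetD r 0 0
    if k > g - 50 ∧ k ≤ g then
      if count < 50 then r :: pvGoA g rest (count + 1)
      else pvGoA g rest count
    else if k ≤ g - 50 then pvGoA g rest count
    else []

def get50cyclebygoal (goal_cycle : List Int) (ball_data : List (List Int)) : List (List (List Int)) :=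
  goal_cycle.map (fun g => pvGoA g ball_data 0)

-- ===== PORT B =====
-- `v if m is None else max(m, v)` of Source B
def pvLo (m : Option Int) (v : Int) : Int :=
  match m with
  | none => v
  | some mv => max mv v

-- the preprocessing loop of Source B building iv (state: running max m)
def pvIv : List (List Int) → Option Int → List (Int × Int × List Int)
  | [], _ => []
  | r :: rest, m =>
    let v := PySem.List.pyGetD r 0 0
    (pvLo m v, v + 50, r) :: pvIv rest (some (pvLo m v))

def get50cyclebygoal_alt (goal_cycle : List Int) (ball_data : List (List Int)) : List (List (List Int)) :=
  let iv := pvIv ball_data none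
  goal_cycle.map (fun g =>
    ((iv.filter (fun t => decide (t.1 ≤ g ∧ g < t.2.1))).map (fun t => t.2.2)).take 50)

-- ===== PRECONDITION & SPEC =====
-- Pre_ excludes ball_data containing an empty row: A raises IndexError whenever some goal's
-- scan reaches it (and whether it is reached depends on A's break, an accident of scan order),
-- while B reads every row's leading value once up front and raises on any empty row.
def Pre_get50cyclebygoal (goal_cycle : List Int) (ball_data : List (List Int)) : Prop :=
  [] ∉ ball_data
instance (goal_cycle : List Int) (ball_data : List (List Int)) : Decidable (Pre_get50cyclebygoal goal_cycle ball_data) := by unfold Pre_get50cyclebygoal; infer_instance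
def pvWitness_get50cyclebygoal : List Int × List (List Int) := ([60, 200], [[5], [20], [55], [170], [300]])

def Spec_get50cyclebygoal (goal_cycle : List Int) (ball_data : List (List Int)) (out : List (List (List Int))) : Prop := out = get50cyclebygoal_alt goal_cycle ball_data
instance (goal_cycle : List Int) (ball_data : List (List Int)) (out : List (List (List Int))) : Decidable (Spec_get50cyclebygoal goal_cycle ball_data out) := by unfold Spec_get50cyclebygoal; infer_instance

-- ===== CLAIM (what is proved, stated in full; the proofs are below) =====
def Claim_equal_get50cyclebygoal : Prop := ∀ (goal_cycle : List Int) (ball_data : List (List Int)), Dom_get50cyclebygoal goal_cycle ball_data → Pre_get50cyclebygoal goal_cycle ball_data → Spec_get50cyclebygoal goal_cycle ball_data (get50cyclebygoal goal_cycle ball_data)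

-- ===== LEMMAS AND PROOFS =====
-- once the running max exceeds g, no later row's interval can contain g
theorem pvIv_dead (g : Int) (l : List (List Int)) :
    ∀ mv : Int, g < mv →
    (pvIv l (some mv)).filter (fun t => decide (t.1 ≤ g ∧ g < t.2.1)) = [] := by
  induction l with
  | nil => intro mv _; simp [pvIv]
  | cons r rest ih =>
    intro mv h
    simp only [pvIv, pvLo, List.filter_cons]
    have h1 : ¬ (max mv (PySem.List.pyGetD r 0 0) ≤ g ∧
        g < PySem.List.pyGetD r 0 0 + 50) := by
      intro hc; have := hc.1; omega
    simp only [decide_eq_true_eq, h1, if_false]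
    exact ih (max mv (PySem.List.pyGetD r 0 0)) (by omega)

theorem pvGoA_eq (g : Int) (l : List (List Int)) :
    ∀ (m : Option Int) (count : Int), 0 ≤ count → count ≤ 50 →
    (∀ mv, m = some mv → mv ≤ g) →
    pvGoA g l count =
      (((pvIv l m).filter (fun t => decide (t.1 ≤ g ∧ g < t.2.1))).map
        (fun t => t.2.2)).take (50 - count).toNat := by
  induction l with
  | nil => intro m count _ _ _; simp [pvGoA, pvIv]
  | cons r rest ih =>
    intro m count h0 h50 hm
    have hmle : pvLo m (PySem.List.pyGetD r 0 0) ≤ max g (PySem.List.pyGetD r 0 0) := by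
      cases m with
      | none => simp [pvLo]
      | some mv => have := hm mv rfl; simp [pvLo]; omega
    simp only [pvGoA, pvIv, List.filter_cons]
    by_cases h1 : PySem.List.pyGetD r 0 0 > g - 50 ∧ PySem.List.pyGetD r 0 0 ≤ g
    · rw [if_pos h1]
      have hkeep : (pvLo m (PySem.List.pyGetD r 0 0) ≤ g ∧
          g < PySem.List.pyGetD r 0 0 + 50) := by
        constructor
        · have := h1.2; omega
        · have := h1.1; omega
      have hm' : ∀ mv, some (pvLo m (PySem.List.pyGetD r 0 0)) = some mv → mv ≤ g := by
        intro mv hmv; cases hmv; exact hkeep.1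
      by_cases h2 : count < 50
      · rw [if_pos h2, ih _ (count + 1) (by omega) (by omega) hm']
        rw [if_pos (decide_eq_true hkeep), List.map_cons]
        have : (50 - count).toNat = (50 - (count + 1)).toNat + 1 := by omega
        rw [this, List.take_succ_cons]
      · rw [if_neg h2, ih _ count h0 h50 hm']
        have hc : count = 50 := by omega
        subst hc
        simp
    · rw [if_neg h1]
      by_cases h3 : PySem.List.pyGetD r 0 0 ≤ g - 50
      · rw [if_pos h3]
        have hdrop : ¬ (pvLo m (PySem.List.pyGetD r 0 0) ≤ g ∧
            g < PySem.List.pyGetD r 0 0 + 50) := by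
          intro hc; have := hc.2; omega
        have hm' : ∀ mv, some (pvLo m (PySem.List.pyGetD r 0 0)) = some mv → mv ≤ g := by
          intro mv hmv; cases hmv
          cases m with
          | none => simpa [pvLo] using h3.trans (by omega)
          | some mv' => have := hm mv' rfl; simp [pvLo]; omega
        rw [ih _ count h0 h50 hm', if_neg (by simpa using hdrop)]
      · rw [if_neg h3]
        have hv : g < PySem.List.pyGetD r 0 0 := by
          rcases not_and_or.mp h1 with h | h
          · omega
          · omega
        have hdrop : ¬ (pvLo m (PySem.List.pyGetD r 0 0) ≤ g ∧
            g < PySem.List.pyGetD r 0 0 + 50) := by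
          intro hc; have h4 := hc.1
          cases m with
          | none => simp [pvLo] at h4; omega
          | some mv => simp [pvLo] at h4; omega
        have hgt : g < pvLo m (PySem.List.pyGetD r 0 0) := by
          cases m with
          | none => simpa [pvLo] using hv
          | some mv => simp [pvLo]; omega
        rw [if_neg (by simpa using hdrop), pvIv_dead g rest _ hgt]
        simp

-- ===== VERDICT (by name: the statement is the Claim_ definition above) =====
theorem get50cyclebygoal_spec : Claim_equal_get50cyclebygoal := by
  intro goal_cycle ball_data _ _
  unfold Spec_get50cyclebygoal get50cyclebygoal get50cyclebygoal_alt
  refine List.map_congr_left (fun g _ => ?_)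
  have := pvGoA_eq g ball_data none 0 (by norm_num) (by norm_num) (by intro mv h; cases h)
  simpa using this
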